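-- pv_equiv track=rewrite | github.com/Sporgelum/PorcineBTMs_Methods | workingEnvironment/03_network/NETS_MI_PVAL_v2/mine_network/ortholog.py | map_modules
-- ===== SOURCE A (Python) =====
-- def map_gene_set(genes: set[str], mapping: dict[str, set[str]]) -> tuple[set[str], int]:
--     """Map source-species genes to target-species genes."""
--     mapped = set()
--     mapped_source = 0
--     for gene in genes:
--         tgts = mapping.get(gene)
--         if tgts:
--             mapped_source += 1
--             mapped.update(tgts)
--     return mapped, mapped_source
--
-- def map_modules(
--     modules: dict[int, list[str]],
--     mapping: dict[str, set[str]],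
-- ) -> tuple[dict[int, list[str]], dict[str, int]]:
--     """Map module gene lists into target-species gene symbols."""
--     mapped_modules: dict[int, list[str]] = {}
--     source_total = 0
--     source_mapped = 0
--
--     for mid, genes in modules.items():
--         src_set = set(genes)
--         source_total += len(src_set)
--         mapped_set, mapped_n = map_gene_set(src_set, mapping)
--         source_mapped += mapped_n
--         mapped_modules[mid] = sorted(mapped_set)
--
--     stats = {
--         "source_unique_genes": source_total,
--         "source_genes_mapped": source_mapped,
--         "mapped_unique_genes": len({g for genes in mapped_modules.values() for g in genes}),
--     }
--     return mapped_modules, stats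
-- ===== SOURCE B (Python) =====
-- def map_modules(
--     modules: dict[int, list[str]],
--     mapping: dict[str, set[str]],
-- ) -> tuple[dict[int, list[str]], dict[str, int]]:
--     """Map module gene lists into target-species gene symbols.
--
--     Mapping-driven algorithm: build a reverse index gene -> module ids once,
--     then a single sweep over mapping.items() scatters each target set into
--     every module that contains the gene; no per-gene mapping.get lookups.
--     """
--     occurs: dict[str, list[int]] = {}
--     per_module: dict[int, set[str]] = {mid: set() for mid in modules}
--     source_total = 0
--     for mid, genes in modules.items():
--         for g in set(genes):
--             source_total += 1
--             occurs.setdefault(g, []).append(mid)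
--
--     source_mapped = 0
--     global_targets: set[str] = set()
--     for gene, tgts in mapping.items():
--         if not tgts:
--             continue
--         mids = occurs.get(gene)
--         if not mids:
--             continue
--         source_mapped += len(mids)
--         global_targets |= tgts
--         for mid in mids:
--             per_module[mid] |= tgts
--
--     mapped_modules = {mid: sorted(s) for mid, s in per_module.items()}
--     stats = {
--         "source_unique_genes": source_total,
--         "source_genes_mapped": source_mapped,
--         "mapped_unique_genes": len(global_targets),
--     }
--     return mapped_modules, stats
-- ===== Notes on version B (the rewrite author's own statement) =====
-- stated objective: alternative
-- what changed: B inverts the traversal: it first builds a reverse index gene -> list of module ids (plus the source_unique count) in one pass over modules, then makes a single sweep over mapping.items() that scatters each target set into every module containing the gene and into a running global set, so there are no per-gene mapping.get lookups and no final rescan of the output; per-module results are sorted at the end.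
import Mathlib
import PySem

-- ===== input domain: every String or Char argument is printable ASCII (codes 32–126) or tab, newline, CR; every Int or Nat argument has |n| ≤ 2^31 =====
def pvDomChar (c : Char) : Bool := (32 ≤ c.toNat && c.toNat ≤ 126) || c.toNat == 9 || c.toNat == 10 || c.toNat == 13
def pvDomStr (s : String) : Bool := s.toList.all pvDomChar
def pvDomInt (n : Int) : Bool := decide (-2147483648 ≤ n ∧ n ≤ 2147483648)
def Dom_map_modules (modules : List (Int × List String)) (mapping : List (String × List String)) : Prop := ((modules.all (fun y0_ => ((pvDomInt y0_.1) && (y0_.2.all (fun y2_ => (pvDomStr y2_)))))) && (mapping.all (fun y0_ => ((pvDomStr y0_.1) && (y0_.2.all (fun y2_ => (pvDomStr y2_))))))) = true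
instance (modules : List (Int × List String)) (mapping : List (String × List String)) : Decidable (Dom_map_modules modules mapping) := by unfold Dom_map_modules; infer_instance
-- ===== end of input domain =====

-- B inverts the traversal: it builds a reverse index gene -> module ids once, then one sweep
-- over the mapping scatters each target set into the modules containing the gene and into a
-- running global set (no per-gene dict lookups, no rescan of the output); same return value
-- (objective: alternative algorithm, no speed claim).

-- ===== PORT A =====
def map_gene_set (genes : PySem.Set String) (mapping : List (String × List String)) :
    PySem.Set String × Int :=
  genes.foldl (fun st gene =>
    match PySem.Dict.get? (PySem.Dict.mk mapping) gene with
    | some tgts => if tgts = [] then st else (PySem.Set.update st.1 tgts, st.2 + 1)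
    | none => st) (PySem.Set.empty, 0)

def map_modules (modules : List (Int × List String)) (mapping : List (String × List String)) :
    (List (Int × List String)) × (List (String × Int)) :=
  let r := modules.foldl
    (fun (acc : PySem.Dict Int (List String) × Int × Int) p =>
      let src_set := PySem.Set.ofList p.2
      let m := map_gene_set src_set mapping
      (PySem.Dict.insert acc.1 p.1 (PySem.List.sorted m.1 (fun g => g) false),
       acc.2.1 + PySem.Set.len src_set, acc.2.2 + m.2))
    (PySem.Dict.mk [], 0, 0)
  (r.1.items,
   [("source_unique_genes", r.2.1), ("source_genes_mapped", r.2.2),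
    ("mapped_unique_genes",
      PySem.Set.len ((PySem.Dict.values r.1).foldl
        (fun s gs => PySem.Set.update s gs) PySem.Set.empty))])

-- ===== PORT B =====
-- Source B phase 1: build the reverse index occurs : gene -> module ids, counting source_total
def alt_phase1 (modules : List (Int × List String)) : PySem.Dict String (List Int) × Int :=
  modules.foldl
    (fun (st : PySem.Dict String (List Int) × Int) p =>
      (PySem.Set.ofList p.2).foldl
        (fun st g =>
          (PySem.Dict.insert st.1 g (PySem.Dict.getD st.1 g [] ++ [p.1]), st.2 + 1))
        st)
    (PySem.Dict.mk [], 0)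

-- Source B phase 2: one sweep over mapping, scattering each target set into the listed modules
def alt_phase2 (mapping : List (String × List String)) (occ : PySem.Dict String (List Int))
    (pm0 : PySem.Dict Int (List String)) :
    PySem.Dict Int (List String) × Int × PySem.Set String :=
  mapping.foldl
    (fun (st : PySem.Dict Int (List String) × Int × PySem.Set String) e =>
      if e.2 = [] then st
      else
        match PySem.Dict.get? occ e.1 with
        | none => st
        | some mids =>
            if mids = [] then st
            else
              (mids.foldl (fun d mid =>
                  PySem.Dict.insert d mid
                    (PySem.Set.update (PySem.Dict.getD d mid []) e.2)) st.1,
               st.2.1 + (mids.length : Int), PySem.Set.update st.2.2 e.2))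
    (pm0, 0, PySem.Set.empty)

def map_modules_alt (modules : List (Int × List String)) (mapping : List (String × List String)) :
    (List (Int × List String)) × (List (String × Int)) :=
  let oc := alt_phase1 modules
  let pm0 := modules.foldl
    (fun (d : PySem.Dict Int (List String)) p => PySem.Dict.insert d p.1 ([] : List String))
    (PySem.Dict.mk [])
  let r := alt_phase2 mapping oc.1 pm0
  (r.1.items.map (fun q => (q.1, PySem.List.sorted q.2 (fun g => g) false)),
   [("source_unique_genes", oc.2), ("source_genes_mapped", r.2.1),
    ("mapped_unique_genes", PySem.Set.len r.2.2)])

-- ===== PRECONDITION & SPEC =====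
-- Pre_ only requires the module ids and the mapping keys to be distinct: the Lean association
-- lists stand for Python dicts, which cannot carry duplicate keys, so no actual Python input
-- is excluded.
def Pre_map_modules (modules : List (Int × List String)) (mapping : List (String × List String)) : Prop :=
  (modules.map Prod.fst).Nodup ∧ (mapping.map Prod.fst).Nodup
instance (modules : List (Int × List String)) (mapping : List (String × List String)) : Decidable (Pre_map_modules modules mapping) := by unfold Pre_map_modules; infer_instance
def pvWitness_map_modules : (List (Int × List String)) × (List (String × List String)) :=
  ([(1, ["a", "b"])], [("a", ["x"])])

def Spec_map_modules (modules : List (Int × List String)) (mapping : List (String × List String)) (out : (List (Int × List String)) × (List (String × Int))) : Prop := out = map_modules_alt modules mapping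
instance (modules : List (Int × List String)) (mapping : List (String × List String)) (out : (List (Int × List String)) × (List (String × Int))) : Decidable (Spec_map_modules modules mapping out) := by unfold Spec_map_modules; infer_instance

-- ===== CLAIM (what is proved, stated in full; the proofs are below) =====
def Claim_equal_map_modules : Prop := ∀ (modules : List (Int × List String)) (mapping : List (String × List String)), Dom_map_modules modules mapping → Pre_map_modules modules mapping → Spec_map_modules modules mapping (map_modules modules mapping)

-- ===== LEMMAS AND PROOFS =====

-- What a gene maps to (A's mapping.get(gene))
def pvTgt (mapping : List (String × List String)) (g : String) : Option (List String) :=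
  PySem.Dict.get? (PySem.Dict.mk mapping) g

-- the set component of one step of A's map_gene_set loop
def pvUpdF (mapping : List (String × List String)) (s : PySem.Set String) (g : String) :
    PySem.Set String :=
  match pvTgt mapping g with
  | some t => if t = [] then s else PySem.Set.update s t
  | none => s

-- the count contribution of one gene in A's map_gene_set loop
def pvCntF (mapping : List (String × List String)) (g : String) : Int :=
  match pvTgt mapping g with
  | some t => if t = [] then 0 else 1
  | none => 0

-- A's per-module mapped set (before sorting)
def pvASet (mapping : List (String × List String)) (genes : List String) : PySem.Set String :=
  (PySem.Set.ofList genes).foldl (pvUpdF mapping) PySem.Set.empty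

-- B's reverse index, in closed form: the ids of the modules whose gene set contains g
def pvOccV (modules : List (Int × List String)) (g : String) : List Int :=
  (modules.filter (fun q => decide (g ∈ PySem.Set.ofList q.2))).map Prod.fst

-- B's per-module accumulated set, in closed form
def pvW (mapping : List (String × List String)) (modules : List (Int × List String))
    (mid : Int) : PySem.Set String :=
  mapping.foldl (fun s e =>
    if e.2 ≠ [] ∧ mid ∈ pvOccV modules e.1 then PySem.Set.update s e.2 else s) []

lemma map_gene_set_closed (S : PySem.Set String) (mapping : List (String × List String)) :
    map_gene_set S mapping
      = (S.foldl (pvUpdF mapping) PySem.Set.empty, (S.map (pvCntF mapping)).sum) := by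
  unfold map_gene_set
  have hf : (fun (st : PySem.Set String × Int) gene =>
      match PySem.Dict.get? (PySem.Dict.mk mapping) gene with
      | some tgts => if tgts = [] then st else (PySem.Set.update st.1 tgts, st.2 + 1)
      | none => st)
      = (fun st gene => (pvUpdF mapping st.1 gene, st.2 + pvCntF mapping gene)) := by
    funext st g
    cases h : PySem.Dict.get? (PySem.Dict.mk mapping) g with
    | none => simp [pvUpdF, pvCntF, pvTgt, h]
    | some t =>
        by_cases he : t = [] <;> simp [pvUpdF, pvCntF, pvTgt, h, he]
  rw [hf, PySem.List.foldl_prod_mk (f := pvUpdF mapping)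
        (g := fun n gene => n + pvCntF mapping gene),
      PySem.List.foldl_add, zero_add]

lemma pv_foldl_update (vs : List (List String)) (s : PySem.Set String) :
    vs.foldl (fun s gs => PySem.Set.update s gs) s = PySem.Set.update s vs.flatten := by
  induction vs generalizing s with
  | nil => simp [PySem.Set.update]
  | cons v vs ih => simp [List.flatten_cons, PySem.Set.update_append, ih]

lemma A_closed (modules : List (Int × List String)) (mapping : List (String × List String))
    (hk : (modules.map Prod.fst).Nodup) :
    map_modules modules mapping =
      (modules.map (fun p => (p.1, PySem.List.sorted (pvASet mapping p.2) (fun g => g) false)),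
       [("source_unique_genes",
           (modules.map (fun p => PySem.Set.len (PySem.Set.ofList p.2))).sum),
        ("source_genes_mapped",
           (modules.map (fun p => ((PySem.Set.ofList p.2).map (pvCntF mapping)).sum)).sum),
        ("mapped_unique_genes",
           PySem.Set.len (PySem.Set.ofList
             ((modules.map (fun p =>
                PySem.List.sorted (pvASet mapping p.2) (fun g => g) false)).flatten)))]) := by
  unfold map_modules
  dsimp only
  rw [PySem.List.foldl_prod_mk
        (f := fun (d : PySem.Dict Int (List String)) (p : Int × List String) =>
          PySem.Dict.insert d p.1
            (PySem.List.sorted (map_gene_set (PySem.Set.ofList p.2) mapping).1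
              (fun g => g) false))
        (g := fun (t : Int × Int) (p : Int × List String) =>
          (t.1 + PySem.Set.len (PySem.Set.ofList p.2),
           t.2 + (map_gene_set (PySem.Set.ofList p.2) mapping).2)),
      PySem.List.foldl_prod_mk
        (f := fun (n : Int) (p : Int × List String) => n + PySem.Set.len (PySem.Set.ofList p.2))
        (g := fun (n : Int) (p : Int × List String) =>
          n + (map_gene_set (PySem.Set.ofList p.2) mapping).2),
      PySem.List.foldl_add, PySem.List.foldl_add, zero_add, zero_add]
  simp only [PySem.Dict.values]
  rw [PySem.Dict.items_foldl_insert_fresh modules Prod.fst _ (PySem.Dict.mk [])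
        (fun a _ => rfl) hk]
  simp only [map_gene_set_closed, List.nil_append, List.map_map, Function.comp_def,
    pv_foldl_update, PySem.Set.update_empty, pvASet]

-- B's reverse index as a dictionary-valued fold (the first component of phase 1)
def pvOccD (modules : List (Int × List String)) : PySem.Dict String (List Int) :=
  modules.foldl
    (fun d p =>
      (PySem.Set.ofList p.2).foldl
        (fun d g => PySem.Dict.insert d g (PySem.Dict.getD d g [] ++ [p.1])) d)
    (PySem.Dict.mk [])

lemma phase1_closed (modules : List (Int × List String)) :
    alt_phase1 modules
      = (pvOccD modules, (modules.map (fun p => PySem.Set.len (PySem.Set.ofList p.2))).sum) := by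
  unfold alt_phase1 pvOccD
  rw [PySem.List.foldl_congr_mem _ _
        (fun (st : PySem.Dict String (List Int) × Int) p =>
          ((PySem.Set.ofList p.2).foldl
              (fun d g => PySem.Dict.insert d g (PySem.Dict.getD d g [] ++ [p.1])) st.1,
           st.2 + ((PySem.Set.ofList p.2).length : Int))) _
        (by
          intro st p _
          rw [PySem.List.foldl_prod_mk
                (f := fun d g => PySem.Dict.insert d g (PySem.Dict.getD d g [] ++ [p.1]))
                (g := fun (n : Int) (_ : String) => n + 1),
              PySem.List.foldl_add (g := fun (_ : String) => (1 : Int))]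
          simp),
      PySem.List.foldl_prod_mk
        (f := fun d (p : Int × List String) =>
          (PySem.Set.ofList p.2).foldl
            (fun d g => PySem.Dict.insert d g (PySem.Dict.getD d g [] ++ [p.1])) d)
        (g := fun (n : Int) (p : Int × List String) => n + ((PySem.Set.ofList p.2).length : Int)),
      PySem.List.foldl_add, zero_add]
  simp [PySem.Set.len]

lemma pvOccV_cons (p : Int × List String) (ms : List (Int × List String)) (g : String) :
    pvOccV (p :: ms) g
      = (if g ∈ PySem.Set.ofList p.2 then [p.1] else []) ++ pvOccV ms g := by
  by_cases h : g ∈ p.2 <;> simp [pvOccV, PySem.Set.mem_ofList, h]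

lemma inner_getD (d : PySem.Dict String (List Int)) (mid : Int) (genes : List String)
    (c : String) :
    ((PySem.Set.ofList genes).foldl
        (fun d g => PySem.Dict.insert d g (PySem.Dict.getD d g [] ++ [mid])) d).getD c []
      = d.getD c [] ++ (if c ∈ PySem.Set.ofList genes then [mid] else []) := by
  have h1 : (PySem.Set.ofList genes).foldl
        (fun d g => PySem.Dict.insert d g (PySem.Dict.getD d g [] ++ [mid])) d
      = ((PySem.Set.ofList genes).map (fun g => (g, mid))).foldl
          (fun d p => PySem.Dict.modify d p.1 [] (fun x => x ++ [p.2])) d := by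
    rw [List.foldl_map]
    rfl
  rw [h1, PySem.Dict.getD_foldl_modify_append]
  congr 1
  rw [List.filter_map]
  have h2 : ((fun (p : String × Int) => p.1 == c) ∘ fun g => (g, mid)) = fun g => g == c := rfl
  rw [h2, List.filter_beq]
  by_cases hc : c ∈ PySem.Set.ofList genes
  · rw [List.count_eq_one_of_mem (PySem.Set.nodup_ofList genes) hc]
    simp [hc]
  · rw [List.count_eq_zero_of_not_mem hc]
    simp [hc]

lemma occD_getD_from (ms : List (Int × List String)) (d : PySem.Dict String (List Int))
    (g : String) :
    (ms.foldl
        (fun d p =>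
          (PySem.Set.ofList p.2).foldl
            (fun d g => PySem.Dict.insert d g (PySem.Dict.getD d g [] ++ [p.1])) d) d).getD g []
      = d.getD g [] ++ pvOccV ms g := by
  induction ms generalizing d with
  | nil => simp [pvOccV]
  | cons p ms ih =>
      rw [List.foldl_cons, ih, inner_getD, pvOccV_cons, List.append_assoc]

lemma phase1_getD (modules : List (Int × List String)) (g : String) :
    PySem.Dict.getD (alt_phase1 modules).1 g [] = pvOccV modules g := by
  rw [phase1_closed]
  exact occD_getD_from modules (PySem.Dict.mk []) g

lemma phase1_total (modules : List (Int × List String)) :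
    (alt_phase1 modules).2
      = (modules.map (fun p => PySem.Set.len (PySem.Set.ofList p.2))).sum := by
  rw [phase1_closed]

lemma phase2_closed (mapping : List (String × List String))
    (occ : PySem.Dict String (List Int)) (pm0 : PySem.Dict Int (List String)) :
    alt_phase2 mapping occ pm0
      = (mapping.foldl
          (fun pm e =>
            if e.2 = [] then pm
            else (PySem.Dict.getD occ e.1 []).foldl
              (fun d mid =>
                PySem.Dict.insert d mid (PySem.Set.update (PySem.Dict.getD d mid []) e.2)) pm)
          pm0,
         (mapping.map (fun e =>
            if e.2 = [] then 0 else ((PySem.Dict.getD occ e.1 []).length : Int))).sum,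
         mapping.foldl
          (fun s e =>
            if e.2 ≠ [] ∧ PySem.Dict.getD occ e.1 [] ≠ [] then PySem.Set.update s e.2 else s)
          PySem.Set.empty) := by
  unfold alt_phase2
  rw [PySem.List.foldl_congr_mem _ _
        (fun (st : PySem.Dict Int (List String) × Int × PySem.Set String) e =>
          (if e.2 = [] then st.1
           else (PySem.Dict.getD occ e.1 []).foldl
             (fun d mid =>
               PySem.Dict.insert d mid (PySem.Set.update (PySem.Dict.getD d mid []) e.2)) st.1,
           st.2.1 + (if e.2 = [] then 0 else ((PySem.Dict.getD occ e.1 []).length : Int)),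
           if e.2 ≠ [] ∧ PySem.Dict.getD occ e.1 [] ≠ [] then PySem.Set.update st.2.2 e.2
           else st.2.2)) _
        (by
          intro st e _
          by_cases he : e.2 = []
          · simp [he]
          · cases hm : PySem.Dict.get? occ e.1 with
            | none =>
                have hg : PySem.Dict.getD occ e.1 [] = [] := by
                  rw [PySem.Dict.getD_eq_get?_getD, hm]; rfl
                simp [he, hg]
            | some mids =>
                have hg : PySem.Dict.getD occ e.1 [] = mids := by
                  rw [PySem.Dict.getD_eq_get?_getD, hm]; rfl
                by_cases hmids : mids = []
                · simp [he, hg, hmids]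
                · simp [he, hg, hmids]),
      PySem.List.foldl_prod_mk
        (f := fun pm (e : String × List String) =>
          if e.2 = [] then pm
          else (PySem.Dict.getD occ e.1 []).foldl
            (fun d mid =>
              PySem.Dict.insert d mid (PySem.Set.update (PySem.Dict.getD d mid []) e.2)) pm)
        (g := fun (t : Int × PySem.Set String) (e : String × List String) =>
          (t.1 + (if e.2 = [] then 0 else ((PySem.Dict.getD occ e.1 []).length : Int)),
           if e.2 ≠ [] ∧ PySem.Dict.getD occ e.1 [] ≠ [] then PySem.Set.update t.2 e.2 else t.2)),
      PySem.List.foldl_prod_mk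
        (f := fun (n : Int) (e : String × List String) =>
          n + (if e.2 = [] then 0 else ((PySem.Dict.getD occ e.1 []).length : Int)))
        (g := fun (s : PySem.Set String) (e : String × List String) =>
          if e.2 ≠ [] ∧ PySem.Dict.getD occ e.1 [] ≠ [] then PySem.Set.update s e.2 else s),
      PySem.List.foldl_add, zero_add]

lemma phase2_count (modules : List (Int × List String)) (mapping : List (String × List String))
    (pm0 : PySem.Dict Int (List String)) :
    (alt_phase2 mapping (alt_phase1 modules).1 pm0).2.1
      = (mapping.map (fun e =>
          if e.2 = [] then 0 else ((pvOccV modules e.1).length : Int))).sum := by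
  rw [phase2_closed]
  simp only [phase1_getD]

lemma phase2_global (modules : List (Int × List String)) (mapping : List (String × List String))
    (pm0 : PySem.Dict Int (List String)) :
    (alt_phase2 mapping (alt_phase1 modules).1 pm0).2.2
      = mapping.foldl (fun s e =>
          if e.2 ≠ [] ∧ pvOccV modules e.1 ≠ [] then PySem.Set.update s e.2 else s)
          PySem.Set.empty := by
  rw [phase2_closed]
  simp only [phase1_getD]

-- distinct keys make the item list of such a dict a function of the key
lemma pv_keys_of_items (pm : PySem.Dict Int (List String)) (modules : List (Int × List String))
    (f : Int → List String) (hpm : pm.items = modules.map (fun p => (p.1, f p.1))) :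
    pm.keys = modules.map Prod.fst := by
  show pm.items.map Prod.fst = _
  rw [hpm, List.map_map]
  rfl

lemma pv_insert_fold (modules : List (Int × List String)) (hk : (modules.map Prod.fst).Nodup)
    (t : List String) (mids : List Int) (hnd : mids.Nodup)
    (hsub : ∀ m ∈ mids, m ∈ modules.map Prod.fst) (f : Int → List String)
    (pm : PySem.Dict Int (List String)) (hpm : pm.items = modules.map (fun p => (p.1, f p.1))) :
    (mids.foldl
        (fun d mid =>
          PySem.Dict.insert d mid (PySem.Set.update (PySem.Dict.getD d mid []) t)) pm).items
      = modules.map (fun p =>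
          (p.1, if p.1 ∈ mids then PySem.Set.update (f p.1) t else f p.1)) := by
  induction mids generalizing f pm with
  | nil => simp [hpm]
  | cons m mids ih =>
      have hkeys : pm.keys = modules.map Prod.fst := pv_keys_of_items pm modules f hpm
      have hmk : m ∈ modules.map Prod.fst := hsub m List.mem_cons_self
      obtain ⟨p0, hp0, hp0m⟩ := List.mem_map.mp hmk
      have hitem : (m, f m) ∈ pm.items := by
        rw [hpm]
        exact List.mem_map.mpr ⟨p0, hp0, by simp [hp0m]⟩
      have hgetD : pm.getD m [] = f m :=
        PySem.Dict.getD_of_mem_items pm hitem (by rw [hkeys]; exact hk) []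
      have hcont : pm.contains m = true := by
        rw [PySem.Dict.contains_iff_mem_keys, hkeys]; exact hmk
      rw [List.foldl_cons, hgetD]
      rw [ih (List.nodup_cons.mp hnd).2 (fun x hx => hsub x (List.mem_cons_of_mem m hx))
            (fun x => if x = m then PySem.Set.update (f x) t else f x)
            (PySem.Dict.insert pm m (PySem.Set.update (f m) t))
            (by
              rw [PySem.Dict.items_insert_of_contains pm _ hcont, hpm, List.map_map]
              refine List.map_congr_left ?_
              intro p _
              by_cases hpe : p.1 = m
              · simp [Function.comp, hpe]
              · simp [Function.comp, hpe])]
      refine List.map_congr_left ?_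
      intro p _
      by_cases h1 : p.1 ∈ mids
      · have hne : p.1 ≠ m := by
          intro h; exact (List.nodup_cons.mp hnd).1 (h ▸ h1)
        simp [h1, hne]
      · by_cases h2 : p.1 = m <;> simp [h1, h2, (List.nodup_cons.mp hnd).1]

lemma pv_pm_fold (modules : List (Int × List String)) (hk : (modules.map Prod.fst).Nodup)
    (l : List (String × List String)) (f : Int → List String)
    (pm : PySem.Dict Int (List String)) (hpm : pm.items = modules.map (fun p => (p.1, f p.1))) :
    (l.foldl
        (fun pm e =>
          if e.2 = [] then pm
          else (pvOccV modules e.1).foldl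
            (fun d mid =>
              PySem.Dict.insert d mid (PySem.Set.update (PySem.Dict.getD d mid []) e.2)) pm)
        pm).items
      = modules.map (fun p =>
          (p.1, l.foldl (fun s e =>
            if e.2 ≠ [] ∧ p.1 ∈ pvOccV modules e.1 then PySem.Set.update s e.2 else s)
            (f p.1))) := by
  induction l generalizing f pm with
  | nil => simp [hpm]
  | cons e l ih =>
      rw [List.foldl_cons]
      by_cases he : e.2 = []
      · rw [if_pos he, ih f pm hpm]
        refine List.map_congr_left ?_
        intro p _
        rw [List.foldl_cons, if_neg (by simp [he])]
      · rw [if_neg he]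
        have hsl : (modules.filter (fun q => decide (e.1 ∈ PySem.Set.ofList q.2))).Sublist
            modules := List.filter_sublist
        have hnd : (pvOccV modules e.1).Nodup := ((hsl.map Prod.fst).nodup) hk
        have hsub : ∀ m ∈ pvOccV modules e.1, m ∈ modules.map Prod.fst := fun m hm =>
          (hsl.map Prod.fst).mem hm
        rw [ih (fun x =>
              if x ∈ pvOccV modules e.1 then PySem.Set.update (f x) e.2 else f x) _
            (pv_insert_fold modules hk e.2 _ hnd hsub f pm hpm)]
        refine List.map_congr_left ?_
        intro p _
        rw [List.foldl_cons]
        by_cases hp : p.1 ∈ pvOccV modules e.1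
        · simp [he, hp]
        · simp [hp]

lemma phase2_items (modules : List (Int × List String)) (mapping : List (String × List String))
    (hk : (modules.map Prod.fst).Nodup) :
    (alt_phase2 mapping (alt_phase1 modules).1
        (modules.foldl
          (fun (d : PySem.Dict Int (List String)) p =>
            PySem.Dict.insert d p.1 ([] : List String))
          (PySem.Dict.mk []))).1.items
      = modules.map (fun p => (p.1, pvW mapping modules p.1)) := by
  rw [phase2_closed]
  simp only [phase1_getD]
  have hpm0 : (modules.foldl
      (fun (d : PySem.Dict Int (List String)) p =>
        PySem.Dict.insert d p.1 ([] : List String)) (PySem.Dict.mk [])).items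
      = modules.map (fun p => (p.1, ([] : List String))) := by
    rw [PySem.Dict.items_foldl_insert_fresh modules Prod.fst (fun _ => ([] : List String))
          (PySem.Dict.mk []) (fun a _ => rfl) hk]
    rfl
  rw [pv_pm_fold modules hk mapping (fun _ => []) _ hpm0]
  rfl

lemma pv_sum_zero (l : List (String × List String)) (g : String)
    (h : g ∉ l.map Prod.fst) :
    (l.map (fun e => if e.2 ≠ [] ∧ e.1 = g then (1 : Int) else 0)).sum = 0 := by
  refine List.sum_eq_zero ?_
  intro x hx
  obtain ⟨e, he, rfl⟩ := List.mem_map.mp hx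
  have : e.1 ≠ g := fun hg => h (hg ▸ List.mem_map_of_mem he)
  simp [this]

lemma pv_sum_key (l : List (String × List String)) (hm : (l.map Prod.fst).Nodup) (g : String) :
    (l.map (fun e => if e.2 ≠ [] ∧ e.1 = g then (1 : Int) else 0)).sum = pvCntF l g := by
  induction l with
  | nil => rfl
  | cons e rest ih =>
      have hstep : pvTgt (e :: rest) g
          = if e.1 == g then some e.2 else pvTgt rest g := by
        simpa [pvTgt] using PySem.Dict.get?_mk_cons e.1 e.2 rest g
      by_cases hkg : e.1 = g
      · have hrest : g ∉ rest.map Prod.fst := by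
          subst hkg
          exact (List.nodup_cons.mp hm).1
        rw [List.map_cons, List.sum_cons, pv_sum_zero rest g hrest]
        by_cases he : e.2 = [] <;> simp [pvCntF, hstep, hkg, he]
      · rw [List.map_cons, List.sum_cons, ih (List.nodup_cons.mp hm).2]
        simp [pvCntF, hstep, hkg]

lemma pv_occ_len (modules : List (Int × List String)) (g : String) :
    ((pvOccV modules g).length : Int)
      = (modules.map (fun p => if g ∈ PySem.Set.ofList p.2 then (1 : Int) else 0)).sum := by
  induction modules with
  | nil => simp [pvOccV]
  | cons p ms ih =>
      rw [pvOccV_cons]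
      by_cases h : g ∈ PySem.Set.ofList p.2
      · simp only [if_pos h, List.map_cons, List.sum_cons, List.singleton_append,
          List.length_cons]
        push_cast
        rw [ih]
        ring
      · simp only [if_neg h, List.map_cons, List.sum_cons, List.nil_append, ih]
        ring

lemma pv_sum_swap (l₁ : List (Int × List String)) (l₂ : List (String × List String))
    (c : (Int × List String) → (String × List String) → Int) :
    (l₁.map (fun a => (l₂.map (fun b => c a b)).sum)).sum
      = (l₂.map (fun b => (l₁.map (fun a => c a b)).sum)).sum := by
  induction l₁ with
  | nil => simp
  | cons a l₁ ih =>
      rw [List.map_cons, List.sum_cons, ih]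
      rw [show (l₂.map (fun b => (List.map (fun a' => c a' b) (a :: l₁)).sum))
            = l₂.map (fun b => c a b + (l₁.map (fun a' => c a' b)).sum) from by
          simp]
      rw [PySem.List.sum_map_add_int]

lemma pv_sum_mem (mapping : List (String × List String)) (hm : (mapping.map Prod.fst).Nodup)
    (S : List String) (hS : S.Nodup) :
    (mapping.map (fun e => if e.2 ≠ [] ∧ e.1 ∈ S then (1 : Int) else 0)).sum
      = (S.map (pvCntF mapping)).sum := by
  induction S with
  | nil => simp
  | cons g S ih =>
      have hg : g ∉ S := (List.nodup_cons.mp hS).1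
      have hsplit : mapping.map (fun e => if e.2 ≠ [] ∧ e.1 ∈ g :: S then (1 : Int) else 0)
          = mapping.map (fun e =>
              (if e.2 ≠ [] ∧ e.1 = g then (1 : Int) else 0)
              + (if e.2 ≠ [] ∧ e.1 ∈ S then (1 : Int) else 0)) := by
        refine List.map_congr_left ?_
        intro e _
        by_cases he : e.2 = []
        · simp [he]
        · by_cases h1 : e.1 = g
          · simp [he, h1, hg]
          · by_cases h2 : e.1 ∈ S <;> simp [he, h1, h2]
      rw [hsplit, PySem.List.sum_map_add_int, pv_sum_key mapping hm g,
          ih (List.nodup_cons.mp hS).2, List.map_cons, List.sum_cons]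

lemma count_exchange (modules : List (Int × List String)) (mapping : List (String × List String))
    (hm : (mapping.map Prod.fst).Nodup) :
    (mapping.map (fun e =>
        if e.2 = [] then 0 else ((pvOccV modules e.1).length : Int))).sum
      = (modules.map (fun p => ((PySem.Set.ofList p.2).map (pvCntF mapping)).sum)).sum := by
  have hterm : mapping.map (fun e =>
      if e.2 = [] then 0 else ((pvOccV modules e.1).length : Int))
      = mapping.map (fun e =>
          (modules.map (fun p => if e.2 ≠ [] ∧ e.1 ∈ PySem.Set.ofList p.2 then (1 : Int) else 0)).sum) := by
    refine List.map_congr_left ?_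
    intro e _
    by_cases he : e.2 = []
    · simp [he]
    · rw [if_neg he, pv_occ_len]
      refine congrArg List.sum (List.map_congr_left ?_)
      intro p _
      simp [he]
  rw [hterm, ← pv_sum_swap modules mapping
        (fun p e => if e.2 ≠ [] ∧ e.1 ∈ PySem.Set.ofList p.2 then (1 : Int) else 0)]
  refine congrArg List.sum (List.map_congr_left ?_)
  intro p _
  exact pv_sum_mem mapping hm (PySem.Set.ofList p.2) (PySem.Set.nodup_ofList p.2)

lemma pv_mem_condfold (l : List (String × List String)) (c : (String × List String) → Prop)
    [DecidablePred c] (s0 : PySem.Set String) (x : String) :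
    x ∈ l.foldl (fun s e => if c e then PySem.Set.update s e.2 else s) s0
      ↔ x ∈ s0 ∨ ∃ e ∈ l, c e ∧ x ∈ e.2 := by
  induction l generalizing s0 with
  | nil => simp
  | cons e l ih =>
      rw [List.foldl_cons]
      by_cases hc : c e
      · rw [if_pos hc, ih, PySem.Set.mem_update]
        constructor
        · rintro (⟨h | h⟩ | ⟨e', he', hce', hx⟩)
          · exact Or.inl h
          · exact Or.inr ⟨e, List.mem_cons_self, hc, h⟩
          · exact Or.inr ⟨e', List.mem_cons_of_mem e he', hce', hx⟩
        · rintro (h | ⟨e', he', hce', hx⟩)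
          · exact Or.inl (Or.inl h)
          · rcases List.mem_cons.mp he' with rfl | he'
            · exact Or.inl (Or.inr hx)
            · exact Or.inr ⟨e', he', hce', hx⟩
      · rw [if_neg hc, ih]
        constructor
        · rintro (h | ⟨e', he', hce', hx⟩)
          · exact Or.inl h
          · exact Or.inr ⟨e', List.mem_cons_of_mem e he', hce', hx⟩
        · rintro (h | ⟨e', he', hce', hx⟩)
          · exact Or.inl h
          · rcases List.mem_cons.mp he' with rfl | he'
            · exact absurd hce' hc
            · exact Or.inr ⟨e', he', hce', hx⟩

lemma pv_nodup_condfold (l : List (String × List String)) (c : (String × List String) → Prop)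
    [DecidablePred c] (s0 : PySem.Set String) (h : s0.Nodup) :
    (l.foldl (fun s e => if c e then PySem.Set.update s e.2 else s) s0).Nodup := by
  induction l generalizing s0 with
  | nil => exact h
  | cons e l ih =>
      rw [List.foldl_cons]
      by_cases hc : c e
      · rw [if_pos hc]; exact ih _ (PySem.Set.nodup_update s0 e.2 h)
      · rw [if_neg hc]; exact ih _ h

lemma pv_mem_aset (mapping : List (String × List String)) (S : List String)
    (s0 : PySem.Set String) (x : String) :
    x ∈ S.foldl (pvUpdF mapping) s0
      ↔ x ∈ s0 ∨ ∃ g ∈ S, ∃ t, pvTgt mapping g = some t ∧ t ≠ [] ∧ x ∈ t := by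
  induction S generalizing s0 with
  | nil => simp
  | cons g S ih =>
      rw [List.foldl_cons]
      have hstep : ∀ s0', x ∈ (pvUpdF mapping s0' g)
          ↔ x ∈ s0' ∨ ∃ t, pvTgt mapping g = some t ∧ t ≠ [] ∧ x ∈ t := by
        intro s0'
        unfold pvUpdF
        cases ht : pvTgt mapping g with
        | none => simp
        | some t =>
            dsimp only
            by_cases he : t = []
            · simp [he]
            · rw [if_neg he, PySem.Set.mem_update]
              simp [he]
      rw [ih, hstep]
      constructor
      · rintro (⟨h | h⟩ | ⟨g', hg', ht⟩)
        · exact Or.inl h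
        · exact Or.inr ⟨g, List.mem_cons_self, h⟩
        · exact Or.inr ⟨g', List.mem_cons_of_mem g hg', ht⟩
      · rintro (h | ⟨g', hg', ht⟩)
        · exact Or.inl (Or.inl h)
        · rcases List.mem_cons.mp hg' with rfl | hg'
          · exact Or.inl (Or.inr ht)
          · exact Or.inr ⟨g', hg', ht⟩

lemma pv_nodup_aset (mapping : List (String × List String)) (S : List String)
    (s0 : PySem.Set String) (h : s0.Nodup) : (S.foldl (pvUpdF mapping) s0).Nodup := by
  induction S generalizing s0 with
  | nil => exact h
  | cons g S ih =>
      rw [List.foldl_cons]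
      refine ih _ ?_
      unfold pvUpdF
      cases pvTgt mapping g with
      | none => exact h
      | some t =>
          dsimp only
          by_cases he : t = []
          · rw [if_pos he]; exact h
          · rw [if_neg he]; exact PySem.Set.nodup_update s0 t h

lemma pv_key_inj (modules : List (Int × List String)) (hk : (modules.map Prod.fst).Nodup)
    {p q : Int × List String} (hp : p ∈ modules) (hq : q ∈ modules) (h : p.1 = q.1) :
    p = q := by
  induction modules with
  | nil => cases hp
  | cons a ms ih =>
      have hna : a.1 ∉ ms.map Prod.fst := (List.nodup_cons.mp hk).1
      rcases List.mem_cons.mp hp with rfl | hp' <;> rcases List.mem_cons.mp hq with rfl | hq'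
      · rfl
      · exfalso; apply hna; rw [h]; exact List.mem_map_of_mem hq'
      · exfalso; apply hna; rw [← h]; exact List.mem_map_of_mem hp'
      · exact ih (List.nodup_cons.mp hk).2 hp' hq'

lemma pv_mem_occV (modules : List (Int × List String)) (hk : (modules.map Prod.fst).Nodup)
    (p : Int × List String) (hp : p ∈ modules) (g : String) :
    p.1 ∈ pvOccV modules g ↔ g ∈ PySem.Set.ofList p.2 := by
  constructor
  · intro h
    obtain ⟨q, hq, hqg⟩ := List.mem_map.mp h
    have hq' := List.mem_filter.mp hq
    have : q = p := pv_key_inj modules hk hq'.1 hp hqg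
    have := hq'.2
    rw [‹q = p›] at this
    exact of_decide_eq_true this
  · intro h
    exact List.mem_map.mpr ⟨p, List.mem_filter.mpr ⟨hp, decide_eq_true h⟩, rfl⟩

lemma pv_tgt_mem (mapping : List (String × List String)) (hm : (mapping.map Prod.fst).Nodup)
    (g : String) (t : List String) :
    pvTgt mapping g = some t ↔ (g, t) ∈ mapping := by
  unfold pvTgt
  exact PySem.Dict.get?_eq_some_iff_mem_items (PySem.Dict.mk mapping) g t hm

lemma per_module_sorted (modules : List (Int × List String))
    (mapping : List (String × List String)) (hk : (modules.map Prod.fst).Nodup)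
    (hm : (mapping.map Prod.fst).Nodup) (p : Int × List String) (hp : p ∈ modules) :
    PySem.List.sorted (pvW mapping modules p.1) (fun g => g) false
      = PySem.List.sorted (pvASet mapping p.2) (fun g => g) false := by
  rw [PySem.List.sorted_id_eq_sorted_id_iff_perm]
  refine (List.perm_ext_iff_of_nodup
      (pv_nodup_condfold mapping _ [] List.nodup_nil)
      (pv_nodup_aset mapping _ PySem.Set.empty List.nodup_nil)).mpr ?_
  intro x
  rw [pv_mem_condfold mapping
        (fun e => e.2 ≠ [] ∧ p.1 ∈ pvOccV modules e.1) [] x,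
      pv_mem_aset]
  simp only [List.not_mem_nil, false_or, PySem.Set.empty]
  constructor
  · rintro ⟨e, he, ⟨hne, hocc⟩, hx⟩
    exact ⟨e.1, (pv_mem_occV modules hk p hp e.1).mp hocc, e.2,
      (pv_tgt_mem mapping hm e.1 e.2).mpr he, hne, hx⟩
  · rintro ⟨g, hg, t, ht, hne, hx⟩
    exact ⟨(g, t), (pv_tgt_mem mapping hm g t).mp ht,
      ⟨hne, (pv_mem_occV modules hk p hp g).mpr hg⟩, hx⟩

lemma global_len (modules : List (Int × List String)) (mapping : List (String × List String))
    (hm : (mapping.map Prod.fst).Nodup) :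
    PySem.Set.len (mapping.foldl (fun s e =>
        if e.2 ≠ [] ∧ pvOccV modules e.1 ≠ [] then PySem.Set.update s e.2 else s)
        PySem.Set.empty)
      = PySem.Set.len (PySem.Set.ofList
          ((modules.map (fun p =>
            PySem.List.sorted (pvASet mapping p.2) (fun g => g) false)).flatten)) := by
  have hperm : (mapping.foldl (fun s e =>
      if e.2 ≠ [] ∧ pvOccV modules e.1 ≠ [] then PySem.Set.update s e.2 else s)
      PySem.Set.empty).Perm
      (PySem.Set.ofList
        ((modules.map (fun p =>
          PySem.List.sorted (pvASet mapping p.2) (fun g => g) false)).flatten)) := by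
    refine (List.perm_ext_iff_of_nodup
        (pv_nodup_condfold mapping _ PySem.Set.empty List.nodup_nil)
        (PySem.Set.nodup_ofList _)).mpr ?_
    intro x
    rw [pv_mem_condfold mapping
          (fun e => e.2 ≠ [] ∧ pvOccV modules e.1 ≠ []) PySem.Set.empty x,
        PySem.Set.mem_ofList, List.mem_flatten]
    simp only [PySem.Set.empty, List.not_mem_nil, false_or, List.mem_map]
    constructor
    · rintro ⟨e, he, ⟨hne, hocc⟩, hx⟩
      have hex : ∃ q ∈ modules, e.1 ∈ PySem.Set.ofList q.2 := by
        by_contra hno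
        push Not at hno
        apply hocc
        unfold pvOccV
        rw [List.map_eq_nil_iff, List.filter_eq_nil_iff]
        intro a ha
        simp [hno a ha]
      obtain ⟨q, hq, hmemq⟩ := hex
      refine ⟨PySem.List.sorted (pvASet mapping q.2) (fun g => g) false, ⟨q, hq, rfl⟩, ?_⟩
      rw [PySem.List.mem_sorted]
      unfold pvASet
      rw [pv_mem_aset]
      exact Or.inr ⟨e.1, hmemq, e.2, (pv_tgt_mem mapping hm e.1 e.2).mpr he, hne, hx⟩
    · rintro ⟨L, ⟨q, hq, rfl⟩, hx⟩
      rw [PySem.List.mem_sorted] at hx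
      unfold pvASet at hx
      rw [pv_mem_aset] at hx
      rcases hx with hx | ⟨g, hg, t, ht, hne, hx⟩
      · simp [PySem.Set.empty] at hx
      · refine ⟨(g, t), (pv_tgt_mem mapping hm g t).mp ht, ⟨hne, ?_⟩, hx⟩
        refine List.ne_nil_of_mem (a := q.1) ?_
        exact List.mem_map.mpr ⟨q, List.mem_filter.mpr ⟨hq, decide_eq_true hg⟩, rfl⟩
  have hlen := hperm.length_eq
  simp only [PySem.Set.len]
  exact_mod_cast hlen

lemma B_closed (modules : List (Int × List String)) (mapping : List (String × List String))
    (hk : (modules.map Prod.fst).Nodup) (hm : (mapping.map Prod.fst).Nodup) :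
    map_modules_alt modules mapping =
      (modules.map (fun p => (p.1, PySem.List.sorted (pvASet mapping p.2) (fun g => g) false)),
       [("source_unique_genes",
           (modules.map (fun p => PySem.Set.len (PySem.Set.ofList p.2))).sum),
        ("source_genes_mapped",
           (modules.map (fun p => ((PySem.Set.ofList p.2).map (pvCntF mapping)).sum)).sum),
        ("mapped_unique_genes",
           PySem.Set.len (PySem.Set.ofList
             ((modules.map (fun p =>
                PySem.List.sorted (pvASet mapping p.2) (fun g => g) false)).flatten)))]) := by
  unfold map_modules_alt
  dsimp only
  rw [phase1_total, phase2_count, count_exchange modules mapping hm,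
      phase2_global, global_len modules mapping hm, phase2_items modules mapping hk]
  rw [List.map_map]
  refine congrArg (fun l => (l, _)) ?_
  refine List.map_congr_left ?_
  intro p hp
  simp only [Function.comp]
  rw [per_module_sorted modules mapping hk hm p hp]

-- ===== VERDICT (by name: the statement is the Claim_ definition above) =====
theorem map_modules_spec : Claim_equal_map_modules := by
  intro modules mapping _ hpre
  unfold Spec_map_modules
  rw [A_closed modules mapping hpre.1, B_closed modules mapping hpre.1 hpre.2]
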